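-- pv_equiv track=rewrite | github.com/Michel-Data-Cloud/cloud-portfolio-aws | CaseStudies/Project-HighlyAvailableScalableArchitecture/fab_email.py | extract_alternations
-- ===== SOURCE A (Python) =====
-- def extract_alternations(pattern):
--     """
--     Extract all {option1|option2|...} patterns from a string
--     Returns list of tuples: (full_match, options_list, start_pos, end_pos)
--     Handles nested braces
--     """
--     alternations = []
--     i = 0
--
--     while i < len(pattern):
--         if pattern[i] == '{':
--             # Find matching closing brace (handle nesting)
--             brace_count = 1
--             j = i + 1
--
--             while j < len(pattern) and brace_count > 0:
--                 if pattern[j] == '{':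
--                     brace_count += 1
--                 elif pattern[j] == '}':
--                     brace_count -= 1
--                 j += 1
--
--             if brace_count == 0:
--                 # Found complete alternation
--                 content = pattern[i+1:j-1]
--
--                 # Split by | but respect nested braces
--                 options = split_by_pipe(content)
--                 alternations.append((pattern[i:j], options, i, j))
--
--             i = j
--         else:
--             i += 1
--
--     return alternations
--
-- def split_by_pipe(content):
--     """
--     Split content by | but respect nested braces
--     Example: "car|{used my}|bike" -> ["car", "{used my}", "bike"]
--     """
--     options = []
--     current = ""
--     brace_count = 0
--
--     for char in content:
--         if char == '{':
--             brace_count += 1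
--             current += char
--         elif char == '}':
--             brace_count -= 1
--             current += char
--         elif char == '|' and brace_count == 0:
--             options.append(current)
--             current = ""
--         else:
--             current += char
--
--     if current:
--         options.append(current)
--
--     return options
-- ===== SOURCE B (Python) =====
-- def extract_alternations(pattern):
--     """
--     Single left-to-right scan with a stack of open-brace indices; options for the
--     current top-level group are collected in the same pass ('|' splits only at depth 1).
--     """
--     results = []
--     stack = []      # indices of unmatched '{'
--     options = []
--     current = ""
--     for i, ch in enumerate(pattern):
--         if ch == '{':
--             if stack:
--                 current += ch
--             else:
--                 options = []
--                 current = ""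
--             stack.append(i)
--         elif ch == '}':
--             if stack:
--                 start = stack.pop()
--                 if stack:
--                     current += ch
--                 else:
--                     if current:
--                         options.append(current)
--                     results.append((pattern[start:i + 1], options, start, i + 1))
--                     options = []
--                     current = ""
--         elif stack:
--             if ch == '|' and len(stack) == 1:
--                 options.append(current)
--                 current = ""
--             else:
--                 current += ch
--     return results
-- ===== Notes on version B (the rewrite author's own statement) =====
-- stated objective: faster
-- what changed: Replaces A's scan-ahead inner loop to find the matching brace followed by a second pass over the extracted content (split_by_pipe) with a single left-to-right pass that keeps a stack of open-brace indices and collects the options of the current top-level group incrementally ('|' splits only at depth 1).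
import Mathlib
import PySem

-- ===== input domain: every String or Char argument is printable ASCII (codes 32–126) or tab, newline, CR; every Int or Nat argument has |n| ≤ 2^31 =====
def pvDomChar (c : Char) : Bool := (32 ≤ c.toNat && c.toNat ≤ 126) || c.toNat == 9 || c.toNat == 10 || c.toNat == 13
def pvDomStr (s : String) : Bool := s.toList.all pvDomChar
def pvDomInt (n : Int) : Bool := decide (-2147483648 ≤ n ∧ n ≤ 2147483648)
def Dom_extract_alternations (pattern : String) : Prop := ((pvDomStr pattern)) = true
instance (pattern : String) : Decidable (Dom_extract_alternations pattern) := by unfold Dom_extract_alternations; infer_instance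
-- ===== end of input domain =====

-- B replaces A's scan-ahead-for-the-matching-brace plus second pass over the content
-- (split_by_pipe) by a single left-to-right pass over enumerate(pattern) maintaining a
-- stack of open-brace indices and collecting the options incrementally (objective:
-- alternative decomposition, same return value).

-- ===== PORT A =====
-- shared slice helper: pattern[a:b] (PySem.List.slice is Python-exact for all Int bounds)
def pvSlice (cs : List Char) (a b : Int) : String :=
  String.ofList (PySem.List.slice cs (some a) (some b))

-- A's inner `while j < len(pattern) and brace_count > 0` loop: returns (j, brace_count)
def findCloseA (cs : List Char) (j : Nat) (count : Int) : Nat × Int :=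
  if h : j < cs.length ∧ 0 < count then
    findCloseA cs (j + 1)
      (if cs[j]'h.1 = '{' then count + 1
       else if cs[j]'h.1 = '}' then count - 1 else count)
  else (j, count)
termination_by cs.length - j

-- the body of split_by_pipe's `for char in content` loop; state = (options, current, brace_count)
def splitStep (st : List String × List Char × Int) (ch : Char) : List String × List Char × Int :=
  if ch = '{' then (st.1, st.2.1 ++ [ch], st.2.2 + 1)
  else if ch = '}' then (st.1, st.2.1 ++ [ch], st.2.2 - 1)
  else if ch = '|' ∧ st.2.2 = 0 then (st.1 ++ [String.ofList st.2.1], [], st.2.2)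
  else (st.1, st.2.1 ++ [ch], st.2.2)

def split_by_pipe (content : List Char) : List String :=
  let st := content.foldl splitStep ([], [], 0)
  if st.2.1 ≠ [] then st.1 ++ [String.ofList st.2.1] else st.1

-- needed by loopA's decreasing_by
theorem findCloseA_le (cs : List Char) : ∀ (n j : Nat) (c : Int), cs.length - j ≤ n →
    j ≤ (findCloseA cs j c).1 := by
  intro n
  induction n with
  | zero => intro j c hn; rw [findCloseA]; split <;> [omega; simp]
  | succ n ih =>
    intro j c hn
    rw [findCloseA]
    split
    · exact le_trans (by omega) (ih (j+1) _ (by omega))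
    · simp

-- A's outer `while i < len(pattern)` loop
def loopA (cs : List Char) (i : Nat) (acc : List (String × List String × Int × Int)) :
    List (String × List String × Int × Int) :=
  if h : i < cs.length then
    if cs[i] = '{' then
      let r := findCloseA cs (i + 1) 1
      if r.2 = 0 then
        loopA cs r.1 (acc ++ [(pvSlice cs i r.1,
          split_by_pipe (PySem.List.slice cs (some ((i : Int) + 1)) (some ((r.1 : Int) - 1))),
          (i : Int), (r.1 : Int))])
      else loopA cs r.1 acc
    else loopA cs (i + 1) acc
  else acc
termination_by cs.length - i
decreasing_by
  · have := findCloseA_le cs cs.length (i + 1) 1 (by omega); omega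
  · have := findCloseA_le cs cs.length (i + 1) 1 (by omega); omega
  · omega

def extract_alternations (pattern : String) : List (String × List String × Int × Int) :=
  loopA pattern.toList 0 []

-- ===== PORT B =====
-- state = (results, stack of open-brace indices, options, current)
def stepB (cs : List Char)
    (st : List (String × List String × Int × Int) × List Int × List String × List Char)
    (p : Int × Char) : List (String × List String × Int × Int) × List Int × List String × List Char :=
  match st, p with
  | (results, stack, options, current), (i, ch) =>
    if ch = '{' then
      if stack = [] then (results, i :: stack, [], [])
      else (results, i :: stack, options, current ++ [ch])
    else if ch = '}' then
      match stack with
      | [] => (results, stack, options, current)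
      | start :: rest =>
        if rest = [] then
          (results ++ [(pvSlice cs start (i + 1),
             (if current ≠ [] then options ++ [String.ofList current] else options),
             start, i + 1)], rest, [], [])
        else (results, rest, options, current ++ [ch])
    else if stack ≠ [] then
      if ch = '|' ∧ stack.length = 1 then (results, stack, options ++ [String.ofList current], [])
      else (results, stack, options, current ++ [ch])
    else (results, stack, options, current)

def extract_alternations_alt (pattern : String) : List (String × List String × Int × Int) :=
  (List.foldl (stepB pattern.toList) ([], [], [], [])
    (PySem.List.enumerate pattern.toList 0)).1

-- ===== PRECONDITION & SPEC =====
def Spec_extract_alternations (pattern : String) (out : List (String × List String × Int × Int)) : Prop := out = extract_alternations_alt pattern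
instance (pattern : String) (out : List (String × List String × Int × Int)) : Decidable (Spec_extract_alternations pattern out) := by unfold Spec_extract_alternations; infer_instance

-- ===== CLAIM (what is proved, stated in full; the proofs are below) =====
def Claim_equal_extract_alternations : Prop := ∀ (pattern : String), Dom_extract_alternations pattern → Spec_extract_alternations pattern (extract_alternations pattern)

-- ===== LEMMAS AND PROOFS =====

-- split_by_pipe's final `if current: options.append(current)` step, as used in the invariant
def pvFinish (st : List String × List Char × Int) : List String :=
  if st.2.1 ≠ [] then st.1 ++ [String.ofList st.2.1] else st.1

theorem findCloseA_stop (cs : List Char) : ∀ (n j : Nat) (c : Int), cs.length - j ≤ n → 0 < c →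
    (findCloseA cs j c).2 ≠ 0 → cs.length ≤ (findCloseA cs j c).1 := by
  intro n
  induction n with
  | zero =>
    intro j c hn hc h
    rw [findCloseA] at h ⊢
    split at h
    · rename_i hcond; omega
    · rename_i hcond; rw [dif_neg hcond]; simp; omega
  | succ n ih =>
    intro j c hn hc h
    rw [findCloseA] at h ⊢
    split at h
    · rename_i hcond
      rw [dif_pos hcond]
      by_cases h0 : (0:Int) < (if cs[j]'hcond.1 = '{' then c + 1 else if cs[j]'hcond.1 = '}' then c - 1 else c)
      · exact ih (j+1) _ (by omega) h0 h
      · have he : (if cs[j]'hcond.1 = '{' then c + 1 else if cs[j]'hcond.1 = '}' then c - 1 else c) = 0 := by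
          split_ifs at * <;> omega
        rw [he, findCloseA] at h
        simp at h
    · rename_i hcond; rw [dif_neg hcond]; simp; omega

theorem findCloseA_pos_lt (cs : List Char) (j : Nat) (c : Int) (hc : 0 < c)
    (h : (findCloseA cs j c).2 = 0) : j < (findCloseA cs j c).1 := by
  rw [findCloseA] at h ⊢
  split at h
  · rename_i hcond
    rw [dif_pos hcond]
    exact lt_of_lt_of_le (by omega) (findCloseA_le cs cs.length (j+1) _ (by omega))
  · simp at h; omega

-- the coupled invariant while at least one brace is open: B's stack is t ++ [i₀],
-- A's brace counter is t.length + 1, split_by_pipe's counter is t.length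
theorem inside (cs : List Char) (n : Nat) :
    ∀ (k : Nat) (t : List Int) (i₀ : Nat) (opts : List String) (cur : List Char)
      (acc : List (String × List String × Int × Int)), cs.length - k ≤ n →
    (List.foldl (stepB cs) (acc, t ++ [((i₀ : Nat) : Int)], opts, cur)
        (PySem.List.enumerate (cs.drop k) (k : Int))).1 =
      (let r := findCloseA cs k ((t.length : Int) + 1)
       if r.2 = 0 then
         (List.foldl (stepB cs)
            (acc ++ [(pvSlice cs i₀ r.1,
               pvFinish (List.foldl splitStep (opts, cur, (t.length : Int))
                 ((cs.drop k).take (r.1 - 1 - k))),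
               (i₀ : Int), (r.1 : Int))], [], [], [])
            (PySem.List.enumerate (cs.drop r.1) (r.1 : Int))).1
       else acc) := by
  induction n with
  | zero =>
    intro k t i0 opts cur acc hn
    have hk : cs.length ≤ k := by omega
    rw [List.drop_eq_nil_of_le hk, findCloseA, dif_neg (by omega)]
    simp [PySem.List.enumerate]
    intro h; exfalso; omega
  | succ n ih =>
    intro k t i0 opts cur acc hn
    by_cases hk : k < cs.length
    · rw [List.drop_eq_getElem_cons hk, PySem.List.enumerate_cons, List.foldl_cons,
        findCloseA, dif_pos (⟨hk, by omega⟩ : k < cs.length ∧ (0:Int) < (t.length:Int)+1)]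
      by_cases hbr : cs[k] = '{'
      · rw [hbr]
        have key := ih (k+1) ((k:Int)::t) i0 opts (cur ++ ['{']) acc (by omega)
        push_cast [List.length_cons] at key
        simp only [List.cons_append] at key
        simp only [stepB, reduceIte, List.append_eq_nil_iff, List.cons_ne_nil, and_false,
          if_false]
        rw [key]
        by_cases hr : (findCloseA cs (k+1) ((t.length:Int) + 1 + 1)).2 = 0
        · have hlt := findCloseA_pos_lt cs (k+1) ((t.length:Int)+1+1) (by omega) hr
          simp only [hr, if_true]
          rw [show (findCloseA cs (k+1) ((t.length:Int) + 1 + 1)).1 - 1 - k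
              = ((findCloseA cs (k+1) ((t.length:Int) + 1 + 1)).1 - 1 - (k+1)) + 1 from by omega,
            List.take_succ_cons, List.foldl_cons]
          simp only [splitStep, reduceIte]
        · simp only [hr, if_false]
      · by_cases hcl : cs[k] = '}'
        · rw [hcl]
          cases t with
          | nil =>
            simp only [List.nil_append, stepB, reduceIte, Char.reduceEq, List.length_nil,
              Nat.cast_zero, zero_add, sub_self]
            rw [findCloseA, dif_neg (by omega)]
            simp only [reduceIte, pvFinish]
            push_cast
            ring_nf
            simp
          | cons a t' =>
            simp only [List.cons_append, stepB, reduceIte, Char.reduceEq, List.append_eq_nil_iff,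
              List.cons_ne_nil, and_false, if_false]
            have key := ih (k+1) t' i0 opts (cur ++ ['}']) acc (by omega)
            push_cast [List.length_cons] at key
            have hc : ((a :: t').length : Int) + 1 - 1 = (t'.length : Int) + 1 := by
              push_cast [List.length_cons]; ring
            rw [hc]
            rw [key]
            by_cases hr : (findCloseA cs (k+1) ((t'.length:Int) + 1)).2 = 0
            · have hlt := findCloseA_pos_lt cs (k+1) ((t'.length:Int)+1) (by omega) hr
              simp only [hr, if_true]
              rw [show (findCloseA cs (k+1) ((t'.length:Int) + 1)).1 - 1 - k
                  = ((findCloseA cs (k+1) ((t'.length:Int) + 1)).1 - 1 - (k+1)) + 1 from by omega,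
                List.take_succ_cons, List.foldl_cons]
              simp only [splitStep, reduceIte]
              push_cast [List.length_cons]
              ring_nf
            · simp only [hr, if_false]
        · -- ordinary character (neither '{' nor '}')
          by_cases hp : cs[k] = '|' ∧ t = []
          · obtain ⟨hpi, hpt⟩ := hp
            subst hpt
            rw [hpi]
            simp only [List.nil_append, stepB, reduceIte, Char.reduceEq, List.cons_ne_nil,
              ne_eq, not_false_iff, if_true, and_self, List.length_cons, List.length_nil,
              Nat.cast_zero, zero_add]
            have key := ih (k+1) [] i0 (opts ++ [String.ofList cur]) [] acc (by omega)
            push_cast [List.length_nil] at key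
            simp only [List.nil_append] at key
            rw [key]
            by_cases hr : (findCloseA cs (k+1) (1:Int)).2 = 0
            · have hlt := findCloseA_pos_lt cs (k+1) (1:Int) (by omega) hr
              simp only [hr, if_true]
              rw [show (findCloseA cs (k+1) (1:Int)).1 - 1 - k
                  = ((findCloseA cs (k+1) (1:Int)).1 - 1 - (k+1)) + 1 from by omega,
                List.take_succ_cons, List.foldl_cons]
              simp only [splitStep, reduceIte, Char.reduceEq, and_self, if_true]
            · simp only [hr, if_false]
          · have hq : ¬(cs[k] = '|' ∧ (t ++ [(i0:Int)]).length = 1) := by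
              rintro ⟨h1, h2⟩
              simp [List.length_append] at h2
              exact hp ⟨h1, h2⟩
            have hq2 : ¬(cs[k] = '|' ∧ (t.length : Int) = 0) := by
              rintro ⟨h1, h2⟩
              exact hp ⟨h1, List.length_eq_zero_iff.mp (by exact_mod_cast h2)⟩
            simp only [stepB, if_neg hbr, if_neg hcl, List.append_eq_nil_iff, List.cons_ne_nil,
              and_false, if_false, ne_eq, not_false_iff, if_true, if_neg hq]
            have key := ih (k+1) t i0 opts (cur ++ [cs[k]]) acc (by omega)
            push_cast at key
            rw [key]
            by_cases hr : (findCloseA cs (k+1) ((t.length:Int) + 1)).2 = 0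
            · have hlt := findCloseA_pos_lt cs (k+1) ((t.length:Int)+1) (by omega) hr
              simp only [hr, if_true]
              rw [show (findCloseA cs (k+1) ((t.length:Int) + 1)).1 - 1 - k
                  = ((findCloseA cs (k+1) ((t.length:Int) + 1)).1 - 1 - (k+1)) + 1 from by omega,
                List.take_succ_cons, List.foldl_cons]
              simp only [splitStep, if_neg hbr, if_neg hcl, if_neg hq2]
            · simp only [hr, if_false]
    · rw [List.drop_eq_nil_of_le (by omega), findCloseA, dif_neg (by omega)]
      simp [PySem.List.enumerate]
      intro h; exfalso; omega

theorem outside (cs : List Char) (n : Nat) :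
    ∀ (k : Nat) (acc : List (String × List String × Int × Int)), cs.length - k ≤ n →
    (List.foldl (stepB cs) (acc, [], [], [])
        (PySem.List.enumerate (cs.drop k) (k : Int))).1 = loopA cs k acc := by
  induction n with
  | zero =>
    intro k acc hn
    rw [List.drop_eq_nil_of_le (by omega), loopA, dif_neg (by omega)]
    simp [PySem.List.enumerate]
  | succ n ih =>
    intro k acc hn
    by_cases hk : k < cs.length
    · rw [List.drop_eq_getElem_cons hk, PySem.List.enumerate_cons, List.foldl_cons,
        loopA, dif_pos hk]
      by_cases hbr : cs[k] = '{'
      · rw [hbr]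
        simp only [stepB, reduceIte, Char.reduceEq]
        have key := inside cs cs.length (k+1) [] k [] [] acc (by omega)
        simp only [List.nil_append, List.length_nil, Nat.cast_zero] at key
        push_cast at key
        rw [key]
        by_cases hr : (findCloseA cs (k+1) (1:Int)).2 = 0
        · have hlt := findCloseA_pos_lt cs (k+1) (1:Int) (by omega) hr
          have hle := findCloseA_le cs cs.length (k+1) (1:Int) (by omega)
          simp only [hr, if_true]
          rw [ih (findCloseA cs (k+1) (1:Int)).1 _ (by omega)]
          rw [show ((k:Int) + 1) = (((k+1 : Nat)):Int) from by push_cast; ring,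
            show (((findCloseA cs (k+1) (1:Int)).1 : Int)) - 1
              = (((findCloseA cs (k+1) (1:Int)).1 - 1 : Nat) : Int) from by omega,
            PySem.List.slice_natCast]
          rfl
        · simp only [hr, if_false]
          rw [loopA, dif_neg (by have := findCloseA_stop cs cs.length (k+1) (1:Int) (by omega) (by omega) hr; omega)]
      · by_cases hcl : cs[k] = '}'
        · rw [hcl]
          simp only [stepB, reduceIte, Char.reduceEq]
          rw [show ((k:Int) + 1) = (((k+1 : Nat)):Int) from by push_cast; ring,
            ih (k+1) acc (by omega)]
        · simp only [stepB, if_neg hbr, if_neg hcl, ne_eq, not_true_eq_false, if_false, reduceIte]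
          rw [show ((k:Int) + 1) = (((k+1 : Nat)):Int) from by push_cast; ring,
            ih (k+1) acc (by omega)]
    · rw [List.drop_eq_nil_of_le (by omega), loopA, dif_neg (by omega)]
      simp [PySem.List.enumerate]

-- ===== VERDICT (by name: the statement is the Claim_ definition above) =====
theorem extract_alternations_spec : Claim_equal_extract_alternations := by
  intro pattern _
  unfold Spec_extract_alternations extract_alternations extract_alternations_alt
  have h := outside pattern.toList pattern.toList.length 0 [] (by omega)
  simpa using h.symm
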